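-- pv_equiv track=rewrite | github.com/paguso/if767_2021_2 | src/lz78.py | max_prefix_match_bf
-- ===== SOURCE A (Python) =====
-- def max_prefix_match_bf(txt, pat):
--     n = len(txt)
--     m = len(pat) - 1
--     p = 0
--     l = 0
--     for i in range(n):
--         j = 0
--         while i+j<n and j<m and pat[j]==txt[i+j]:
--             j += 1
--         if j > l:
--             l = j
--             p = i
--     return p, l
-- ===== SOURCE B (Python) =====
-- def max_prefix_match_bf(txt, pat):
--     # Search by length instead of by position: try prefix lengths from the
--     # longest possible down, using str.find for the earliest occurrence.
--     P = pat[:len(pat)-1]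
--     for l in range(min(len(P), len(txt)), 0, -1):
--         p = txt.find(P[:l])
--         if p != -1:
--             return p, l
--     return 0, 0
-- ===== Notes on version B (the rewrite author's own statement) =====
-- stated objective: alternative
-- what changed: Instead of scanning every text position with an inner character-compare loop and tracking the running best, B iterates over candidate prefix lengths from the largest possible down and uses str.find to locate the earliest occurrence of that prefix, returning on the first length that occurs.
import Mathlib
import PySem

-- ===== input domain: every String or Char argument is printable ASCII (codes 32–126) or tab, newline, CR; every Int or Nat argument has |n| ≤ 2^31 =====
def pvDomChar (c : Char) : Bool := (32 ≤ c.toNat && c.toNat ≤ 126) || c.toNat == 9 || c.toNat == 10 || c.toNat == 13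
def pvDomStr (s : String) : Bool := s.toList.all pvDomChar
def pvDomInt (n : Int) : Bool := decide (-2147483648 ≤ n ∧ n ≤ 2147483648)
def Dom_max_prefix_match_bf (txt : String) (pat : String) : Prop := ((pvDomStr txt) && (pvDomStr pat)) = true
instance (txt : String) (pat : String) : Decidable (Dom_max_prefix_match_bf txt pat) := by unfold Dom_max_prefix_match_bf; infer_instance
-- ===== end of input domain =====

-- B replaces A's position-by-position brute-force scan with a search over candidate
-- prefix lengths, longest first, using the first-occurrence substring search (str.find).
-- Equivalence of the RETURN VALUES is proved for all inputs (both programs are total).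

-- ===== PORT A =====
-- inner 'while i+j<n and j<m and pat[j]==txt[i+j]: j += 1'
def aWhile (txtL patL : List Char) (n m i : Int) (j : Int) : Int :=
  if h : i + j < n ∧ j < m ∧ PySem.List.pyGet? patL j = PySem.List.pyGet? txtL (i + j) then
    aWhile txtL patL n m i (j + 1)
  else j
termination_by (n - (i + j)).toNat
decreasing_by omega

def max_prefix_match_bf (txt : String) (pat : String) : Int × Int :=
  let n : Int := PySem.Str.len txt
  let m : Int := PySem.Str.len pat - 1
  (PySem.List.pyRange 0 n 1).foldl
    (fun (s : Int × Int) i =>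
      let j := aWhile txt.toList pat.toList n m i 0
      if s.2 < j then (i, j) else s)
    (0, 0)

-- ===== PORT B =====
-- 'for l in range(min(len(P), len(txt)), 0, -1): p = txt.find(P[:l]); if p != -1: return p, l'
def altLoop (txtL P : List Char) : Nat → Int × Int
  | 0 => (0, 0)
  | l + 1 =>
    let p := PySem.Chars.find txtL (P.take (l + 1))
    if p ≠ -1 then (p, ((l : Int) + 1)) else altLoop txtL P l

def max_prefix_match_bf_alt (txt : String) (pat : String) : Int × Int :=
  let P := PySem.List.slice pat.toList none (some (PySem.Str.len pat - 1))
  altLoop txt.toList P (min P.length txt.toList.length)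

-- ===== PRECONDITION & SPEC =====
def Spec_max_prefix_match_bf (txt : String) (pat : String) (out : Int × Int) : Prop := out = max_prefix_match_bf_alt txt pat
instance (txt : String) (pat : String) (out : Int × Int) : Decidable (Spec_max_prefix_match_bf txt pat out) := by unfold Spec_max_prefix_match_bf; infer_instance

-- ===== CLAIM (what is proved, stated in full; the proofs are below) =====
def Claim_equal_max_prefix_match_bf : Prop := ∀ (txt : String) (pat : String), Dom_max_prefix_match_bf txt pat → Spec_max_prefix_match_bf txt pat (max_prefix_match_bf txt pat)


-- ===== LEMMAS AND PROOFS =====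

-- longest common prefix length of two lists
def lcp : List Char → List Char → Nat
  | a :: as, b :: bs => if a = b then lcp as bs + 1 else 0
  | _, _ => 0

theorem lcp_le_left (a b : List Char) : lcp a b ≤ a.length := by
  induction a generalizing b with
  | nil => cases b <;> simp [lcp]
  | cons x xs ih =>
    cases b with
    | nil => simp [lcp]
    | cons y ys => simp only [lcp]; split_ifs <;> simp; exact ih ys

theorem lcp_le_right (a b : List Char) : lcp a b ≤ b.length := by
  induction a generalizing b with
  | nil => cases b <;> simp [lcp]
  | cons x xs ih =>
    cases b with
    | nil => simp [lcp]
    | cons y ys => simp only [lcp]; split_ifs <;> simp; exact ih ys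

theorem le_lcp_iff (a b : List Char) (l : Nat) :
    l ≤ lcp a b ↔ l ≤ a.length ∧ l ≤ b.length ∧ a.take l = b.take l := by
  induction l generalizing a b with
  | zero => simp
  | succ l ih =>
    cases a with
    | nil => simp [lcp]
    | cons x xs =>
      cases b with
      | nil => simp [lcp]
      | cons y ys =>
        simp only [lcp, List.take_succ_cons, List.length_cons]
        split_ifs with hxy
        · subst hxy
          rw [Nat.succ_le_succ_iff, ih]
          constructor
          · rintro ⟨h1, h2, h3⟩; exact ⟨by omega, by omega, by rw [h3]⟩
          · rintro ⟨h1, h2, h3⟩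
            refine ⟨by omega, by omega, ?_⟩
            simpa using h3
        · constructor
          · omega
          · rintro ⟨-, -, h3⟩
            exact absurd (by simpa using congrArg (·.headI) h3) hxy

-- prefix-length l matches at i  ↔  the match length at i is ≥ l   (for l ≤ |Q|)
theorem le_lcp_iff_prefix (Q L : List Char) (i l : Nat) (hl : l ≤ Q.length) :
    l ≤ lcp Q (L.drop i) ↔ Q.take l <+: L.drop i := by
  have hlt : (Q.take l).length = l := by simp [List.length_take, Nat.min_eq_left hl]
  constructor
  · intro hle
    obtain ⟨h1, h2, h3⟩ := (le_lcp_iff Q (L.drop i) l).mp hle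
    rw [List.prefix_iff_eq_take, hlt, h3]
  · intro h
    have hlen : l ≤ (L.drop i).length := by
      have := h.length_le
      rwa [hlt] at this
    refine (le_lcp_iff Q (L.drop i) l).mpr ⟨hl, hlen, ?_⟩
    have := List.prefix_iff_eq_take.mp h
    rwa [hlt] at this

def IsBest (f : Nat → Nat) (n : Nat) (s : Int × Int) : Prop :=
  (∀ i, i < n → (f i : Int) ≤ s.2) ∧ 0 ≤ s.2 ∧
  (s.2 = 0 → s = (0, 0)) ∧
  (0 < s.2 → 0 ≤ s.1 ∧ s.1.toNat < n ∧ (f s.1.toNat : Int) = s.2 ∧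
    ∀ i, i < s.1.toNat → (f i : Int) < s.2)

theorem lcp_nil_left (b : List Char) : lcp [] b = 0 := by cases b <;> rfl
theorem lcp_nil_right (a : List Char) : lcp a [] = 0 := by cases a <;> rfl

theorem IsBest_unique (f : Nat → Nat) (n : Nat) (s t : Int × Int)
    (hs : IsBest f n s) (ht : IsBest f n t) : s = t := by
  obtain ⟨hs1, hs2, hs3, hs4⟩ := hs
  obtain ⟨ht1, ht2, ht3, ht4⟩ := ht
  by_cases h0 : s.2 = 0
  · by_cases h0' : t.2 = 0
    · rw [hs3 h0, ht3 h0']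
    · obtain ⟨-, hlt, hf, -⟩ := ht4 (by omega)
      have := hs1 _ hlt
      omega
  · obtain ⟨hp0, hlt, hf, hmin⟩ := hs4 (by omega)
    have hts : (f s.1.toNat : Int) ≤ t.2 := ht1 _ hlt
    obtain ⟨hp0', hlt', hf', hmin'⟩ := ht4 (by omega)
    have hst : (f t.1.toNat : Int) ≤ s.2 := hs1 _ hlt'
    have hv : s.2 = t.2 := by omega
    have hpp : s.1.toNat = t.1.toNat := by
      rcases Nat.lt_trichotomy s.1.toNat t.1.toNat with h | h | h
      · have := hmin' _ h; omega
      · exact h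
      · have := hmin _ h; omega
    have hp : s.1 = t.1 := by omega
    exact Prod.ext hp hv

def bestUpTo (f : Nat → Nat) : Nat → Int × Int
  | 0 => (0, 0)
  | k + 1 =>
    let s := bestUpTo f k
    if s.2 < (f k : Int) then ((k : Int), (f k : Int)) else s

theorem bestUpTo_isBest (f : Nat → Nat) (k : Nat) : IsBest f k (bestUpTo f k) := by
  induction k with
  | zero =>
    exact ⟨fun i hi => absurd hi (by omega), by simp [bestUpTo], fun _ => rfl,
      fun h => absurd h (by simp [bestUpTo])⟩
  | succ k ih =>
    obtain ⟨h1, h2, h3, h4⟩ := ih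
    rw [bestUpTo]
    split_ifs with hlt
    · refine ⟨?_, by positivity, by simp; omega, ?_⟩
      · intro i hi
        rcases Nat.lt_succ_iff_lt_or_eq.mp hi with h | h
        · have := h1 _ h; simp; omega
        · subst h; simp
      · intro _
        refine ⟨by positivity, by simp, by simp, ?_⟩
        intro i hi
        simp only [Int.toNat_natCast] at hi
        have := h1 _ hi
        simp; omega
    · refine ⟨?_, h2, ?_, ?_⟩
      · intro i hi
        rcases Nat.lt_succ_iff_lt_or_eq.mp hi with h | h
        · exact h1 _ h
        · subst h; omega
      · intro h0
        exact h3 h0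
      · intro hpos
        obtain ⟨hpa, hlt', hf, hmin⟩ := h4 hpos
        exact ⟨hpa, by omega, hf, hmin⟩


theorem aWhile_eq (txtL patL : List Char) (i j : Nat) :
    aWhile txtL patL (txtL.length : Int) ((patL.length : Int) - 1) (i : Int) (j : Int)
      = (j : Int) + (lcp ((patL.take (patL.length - 1)).drop j) (txtL.drop (i + j)) : Int) := by
  have key : ∀ d (j : Nat), txtL.length - (i + j) ≤ d →
      aWhile txtL patL (txtL.length : Int) ((patL.length : Int) - 1) (i : Int) (j : Int)
      = (j : Int) + (lcp ((patL.take (patL.length - 1)).drop j) (txtL.drop (i + j)) : Int) := by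
    intro d
    induction d with
    | zero =>
      intro j hd
      -- i + j ≥ txtL.length, loop condition false, drop empty
      rw [aWhile]
      rw [dif_neg (by omega)]
      rw [show List.drop (i + j) txtL = [] from List.drop_eq_nil_of_le (by omega), lcp_nil_right]
      simp
    | succ d ih =>
      intro j hd
      rw [aWhile]
      by_cases hc : (i : Int) + (j : Int) < (txtL.length : Int) ∧ (j : Int) < (patL.length : Int) - 1 ∧
          PySem.List.pyGet? patL (j : Int) = PySem.List.pyGet? txtL ((i : Int) + (j : Int))
      · rw [dif_pos hc]
        obtain ⟨h1, h2, h3⟩ := hc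
        have hjn : i + j < txtL.length := by exact_mod_cast h1
        have hjm : j < patL.length - 1 := by omega
        have hjp : j < patL.length := by omega
        -- heads
        rw [show (i : Int) + (j : Int) = ((i + j : Nat) : Int) by push_cast; ring,
            PySem.List.pyGet?_natCast, PySem.List.pyGet?_natCast] at h3
        rw [List.getElem?_eq_getElem hjp, List.getElem?_eq_getElem hjn] at h3
        have hheads : patL[j] = txtL[i + j] := by simpa using h3
        have hQj : j < (patL.take (patL.length - 1)).length := by simp; omega
        have e1 : (patL.take (patL.length - 1)).drop j
            = (patL.take (patL.length - 1))[j] :: (patL.take (patL.length - 1)).drop (j + 1) :=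
          List.drop_eq_getElem_cons hQj
        have e2 : txtL.drop (i + j) = txtL[i + j] :: txtL.drop (i + j + 1) :=
          List.drop_eq_getElem_cons hjn
        have eQ : (patL.take (patL.length - 1))[j] = patL[j] := List.getElem_take
        have ihj := ih (j + 1) (by omega)
        rw [show ((j : Int) + 1) = ((j + 1 : Nat) : Int) by push_cast; ring, ihj]
        rw [e1, e2, eQ, hheads]
        rw [show i + (j + 1) = i + j + 1 by omega]
        simp only [lcp, if_pos]
        push_cast
        ring
      · rw [dif_neg hc]
        -- lcp = 0
        have h0 : lcp ((patL.take (patL.length - 1)).drop j) (txtL.drop (i + j)) = 0 := by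
          by_cases h1 : i + j < txtL.length
          · by_cases h2 : j < patL.length - 1
            · -- heads must differ
              have h3 : ¬ PySem.List.pyGet? patL (j : Int) = PySem.List.pyGet? txtL ((i : Int) + (j : Int)) := by
                intro h; exact hc ⟨by exact_mod_cast h1, by omega, h⟩
              rw [show (i : Int) + (j : Int) = ((i + j : Nat) : Int) by push_cast; ring,
                  PySem.List.pyGet?_natCast, PySem.List.pyGet?_natCast,
                  List.getElem?_eq_getElem (by omega : j < patL.length),
                  List.getElem?_eq_getElem h1] at h3
              have hne : patL[j] ≠ txtL[i + j] := by simpa using h3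
              have hQj : j < (patL.take (patL.length - 1)).length := by simp; omega
              rw [List.drop_eq_getElem_cons hQj, List.drop_eq_getElem_cons h1]
              simp only [lcp]
              rw [if_neg (by rw [List.getElem_take]; exact hne)]
            · rw [show List.drop j (List.take (patL.length - 1) patL) = [] from
                  List.drop_eq_nil_of_le (by simp; omega), lcp_nil_left]
          · rw [show List.drop (i + j) txtL = [] from List.drop_eq_nil_of_le (by omega), lcp_nil_right]
        rw [h0]; simp
  exact key (txtL.length - (i + j)) j le_rfl

theorem foldA (txt pat : String) (k : Nat) :
    (List.map (fun (i : Nat) => (i : Int)) (List.range k)).foldl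
      (fun (s : Int × Int) i =>
        let j := aWhile txt.toList pat.toList (txt.toList.length : Int) ((pat.toList.length : Int) - 1) i 0
        if s.2 < j then (i, j) else s)
      (0, 0)
    = bestUpTo (fun i => lcp (pat.toList.take (pat.toList.length - 1)) (txt.toList.drop i)) k := by
  induction k with
  | zero => simp [bestUpTo]
  | succ k ih =>
    rw [List.range_succ, List.map_append, List.foldl_append, ih]
    simp only [List.map_cons, List.map_nil, List.foldl_cons, List.foldl_nil]
    rw [show ((0 : Int)) = ((0 : Nat) : Int) by norm_num, aWhile_eq]
    simp [bestUpTo]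


theorem portA_eq_bestUpTo (txt pat : String) :
    max_prefix_match_bf txt pat
      = bestUpTo (fun i => lcp (pat.toList.take (pat.toList.length - 1)) (txt.toList.drop i))
          txt.toList.length := by
  simp only [max_prefix_match_bf, PySem.Str.len_eq, PySem.List.pyRange_zero_natCast]
  exact foldA txt pat txt.toList.length

theorem altLoop_isBest (txtL Q : List Char) (l : Nat)
    (hl : l ≤ min Q.length txtL.length)
    (H : ∀ l', l < l' → l' ≤ min Q.length txtL.length → ¬ (Q.take l') <:+: txtL) :
    IsBest (fun i => lcp Q (txtL.drop i)) txtL.length (altLoop txtL Q l) := by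
  -- the match length at any position is at most min |Q| |txt|
  have hcap : ∀ i, lcp Q (txtL.drop i) ≤ min Q.length txtL.length := by
    intro i
    have h1 := lcp_le_left Q (txtL.drop i)
    have h2 := lcp_le_right Q (txtL.drop i)
    simp [List.length_drop] at h2 ⊢
    omega
  -- no occurrence of any length > l means every match length is ≤ l
  have hub : ∀ i, i < txtL.length → lcp Q (txtL.drop i) ≤ l := by
    intro i hi
    by_contra hgt
    rw [Nat.not_le] at hgt
    set v := lcp Q (txtL.drop i) with hv
    have hvcap := hcap i
    have hpre : Q.take v <+: txtL.drop i :=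
      (le_lcp_iff_prefix Q txtL i v (by omega)).mp le_rfl
    exact H v hgt (by omega)
      ((PySem.Chars.isIn_iff_infix _ _).mp
        ((PySem.Chars.exists_prefix_drop_iff_isIn _ _).mp ⟨i, hpre⟩))
  induction l with
  | zero =>
    refine ⟨fun i hi => by simpa [altLoop] using hub i hi, by simp [altLoop], fun _ => rfl, by simp [altLoop]⟩
  | succ l ih =>
    rw [altLoop]
    by_cases hp : PySem.Chars.find txtL (Q.take (l + 1)) ≠ -1
    · rw [if_pos hp]
      have hpos : 0 ≤ PySem.Chars.find txtL (Q.take (l + 1)) := by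
        have := PySem.Chars.neg_one_le_find txtL (Q.take (l + 1))
        omega
      obtain ⟨hpref, hmin⟩ := PySem.Chars.find_spec hpos
      set p := (PySem.Chars.find txtL (Q.take (l + 1))).toNat with hpdef
      have hQl : l + 1 ≤ Q.length := by omega
      have hplen : p < txtL.length := by
        have hlen := hpref.length_le
        simp [List.length_take, Nat.min_eq_left hQl, List.length_drop] at hlen
        omega
      have hfp : l + 1 ≤ lcp Q (txtL.drop p) :=
        (le_lcp_iff_prefix Q txtL p (l + 1) hQl).mpr hpref
      have hfp' : lcp Q (txtL.drop p) = l + 1 :=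
        Nat.le_antisymm (hub p hplen) hfp
      refine ⟨?_, by positivity, by omega, ?_⟩
      · intro i hi
        have := hub i hi
        simp; omega
      · intro _
        refine ⟨hpos, hplen, by show ((lcp Q (txtL.drop p) : Nat) : Int) = (l : Int) + 1; rw [hfp']; push_cast; ring, ?_⟩
        intro i hi
        have hnp : ¬ Q.take (l + 1) <+: txtL.drop i := hmin i hi
        have : ¬ (l + 1 ≤ lcp Q (txtL.drop i)) := fun h =>
          hnp ((le_lcp_iff_prefix Q txtL i (l + 1) hQl).mp h)
        simp
        omega
    · rw [if_neg hp]
      simp only [ne_eq, not_not] at hp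
      have hnotin : ¬ (Q.take (l + 1)) <:+: txtL :=
        (PySem.Chars.find_eq_neg_one_iff _ _).mp hp
      have H' : ∀ l', l < l' → l' ≤ min Q.length txtL.length → ¬ (Q.take l') <:+: txtL := by
        intro l' h1 h2
        rcases Nat.lt_or_ge l' (l + 2) with h | h
        · have : l' = l + 1 := by omega
          subst this; exact hnotin
        · exact H l' (by omega) h2
      have hub' : ∀ i, i < txtL.length → lcp Q (txtL.drop i) ≤ l := by
        intro i hi
        by_contra hgt
        rw [Nat.not_le] at hgt
        set v := lcp Q (txtL.drop i) with hv
        have hvcap := hcap i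
        have hpre : Q.take v <+: txtL.drop i :=
          (le_lcp_iff_prefix Q txtL i v (by omega)).mp le_rfl
        exact H' v hgt (by omega)
          ((PySem.Chars.isIn_iff_infix _ _).mp
            ((PySem.Chars.exists_prefix_drop_iff_isIn _ _).mp ⟨i, hpre⟩))
      exact ih (by omega) H' hub'

theorem portB_isBest (txt pat : String) :
    IsBest (fun i => lcp (pat.toList.take (pat.toList.length - 1)) (txt.toList.drop i))
      txt.toList.length (max_prefix_match_bf_alt txt pat) := by
  have hQ : PySem.List.slice pat.toList none (some (PySem.Str.len pat - 1))
      = pat.toList.take (pat.toList.length - 1) := by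
    rw [PySem.Str.len_eq]
    cases hp : pat.toList with
    | nil => rfl
    | cons c cs =>
      rw [show ((c :: cs).length : Int) - 1 = ((cs.length : Nat) : Int) by simp,
          PySem.List.slice_to_natCast]
      simp
  simp only [max_prefix_match_bf_alt, hQ]
  exact altLoop_isBest _ _ _ le_rfl (fun l' h1 h2 => absurd (by omega : l' ≤ l') (by omega))

-- ===== VERDICT (by name: the statement is the Claim_ definition above) =====
theorem max_prefix_match_bf_spec : Claim_equal_max_prefix_match_bf := by
  intro txt pat _
  unfold Spec_max_prefix_match_bf
  rw [portA_eq_bestUpTo]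
  exact IsBest_unique _ _ _ _ (bestUpTo_isBest _ _) (portB_isBest txt pat)
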